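-- pv_equiv track=rewrite | github.com/alexandraback/datacollection | solutions_5695413893988352_0/Python/macmak/b.py | give_options
-- ===== SOURCE A (Python) =====
-- def give_options(s):
--     dig = s.count('?')
--     for i in range(10**dig):
--         istr = str(i).zfill(dig)
--         out = ''
--         for c in s:
--             if c=='?':
--                 out += istr[0]
--                 istr = istr[1:]
--             else:
--                 out+=c
--         yield out
-- ===== SOURCE B (Python) =====
-- def give_options(s):
--     # Split once on '?' and grow the result set per hole: each step appends every
--     # digit plus the next literal chunk to every string built so far, which yields
--     # the same lexicographic order as counting 0..10**dig-1 with zfill.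
--     parts = s.split('?')
--     outs = [parts[0]]
--     for part in parts[1:]:
--         outs = [o + d + part for o in outs for d in '0123456789']
--     yield from outs
-- ===== Notes on version B (the rewrite author's own statement) =====
-- stated objective: faster
-- what changed: Replaced base-10 counting over range(10**dig) with str(i).zfill(dig) plus a per-character substitution scan of the whole string for every output by a single split on '?' and an iterative product build: each step extends every string built so far with one digit and the next literal chunk, in the same lexicographic order.
import Mathlib
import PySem

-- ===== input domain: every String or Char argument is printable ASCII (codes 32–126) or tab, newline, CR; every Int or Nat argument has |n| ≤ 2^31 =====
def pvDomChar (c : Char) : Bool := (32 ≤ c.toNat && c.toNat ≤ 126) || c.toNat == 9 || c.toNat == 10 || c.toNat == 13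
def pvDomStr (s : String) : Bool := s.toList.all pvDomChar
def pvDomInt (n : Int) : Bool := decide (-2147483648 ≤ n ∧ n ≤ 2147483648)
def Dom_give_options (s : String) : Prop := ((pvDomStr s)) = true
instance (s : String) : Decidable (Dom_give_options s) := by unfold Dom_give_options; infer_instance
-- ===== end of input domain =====

-- B replaces A's base-10 counting (range(10**dig) + zfill + a consuming scan) by a
-- structural recursion on the string branching over the ten digits at each '?';
-- same outputs in the same order (both generators are compared by the values yielded).

-- ===== PORT A =====
def give_options (s : String) : List String :=
  -- dig = s.count('?'); for i in range(10**dig): istr = str(i).zfill(dig); inner loop: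
  -- out += istr[0]; istr = istr[1:]  (istr[0] ported as take 1: istr is nonempty
  -- whenever a '?' is reached, since zfill pads istr to at least dig chars)
  (PySem.List.pyRange 0 ((10 : Int) ^ PySem.Str.count s "?") 1).map (fun i =>
    String.mk (s.toList.foldl
      (fun (st : List Char × List Char) c =>
        if c = '?' then (st.1 ++ st.2.take 1, st.2.drop 1) else (st.1 ++ [c], st.2))
      ([], PySem.Chars.zfill (PySem.Int.toChars i) (PySem.Str.count s "?" : Int))).1)

-- ===== PORT B =====
def give_options_alt (s : String) : List String :=
  -- parts = s.split('?'); outs = [parts[0]]; for part in parts[1:]: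
  --   outs = [o + d + part for o in outs for d in '0123456789']
  -- (parts[0] ported as headI: split always returns a nonempty list)
  let parts := PySem.Chars.splitOn s.toList ['?']
  ((parts.drop 1).foldl
      (fun outs part => outs.flatMap (fun o => ("0123456789".toList).map (fun d => o ++ d :: part)))
      [parts.headI]).map String.mk

-- ===== PRECONDITION & SPEC =====
def Spec_give_options (s : String) (out : List String) : Prop := out = give_options_alt s
instance (s : String) (out : List String) : Decidable (Spec_give_options s out) := by unfold Spec_give_options; infer_instance

-- ===== CLAIM (what is proved, stated in full; the proofs are below) =====
def Claim_equal_give_options : Prop := ∀ (s : String), Dom_give_options s → Spec_give_options s (give_options s)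

-- ===== LEMMAS AND PROOFS =====

-- the digit string of k (str(k) for k : Nat), as a structural recursion
def pvRep (k : Nat) : List Char :=
  if k < 10 then [Nat.digitChar k] else pvRep (k / 10) ++ [Nat.digitChar (k % 10)]
  decreasing_by exact Nat.div_lt_self (by omega) (by omega)

-- substitute the chars of istr into the '?' positions of cs
def pvSubst : List Char → List Char → List Char
  | [], _ => []
  | c :: cs, istr => if c = '?' then istr.take 1 ++ pvSubst cs (istr.drop 1) else c :: pvSubst cs istr

-- k padded to d digits, top digit first (top-down)
def pvPad : Nat → Nat → List Char
  | 0, _ => []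
  | d + 1, k => Nat.digitChar (k / 10 ^ d) :: pvPad d (k % 10 ^ d)

-- k padded to d digits, built bottom-up
def pvPadBU : Nat → Nat → List Char
  | 0, _ => []
  | d + 1, k => pvPadBU d (k / 10) ++ [Nat.digitChar (k % 10)]

theorem pvRep_lt {k : Nat} (h : k < 10) : pvRep k = [Nat.digitChar k] := by
  rw [pvRep]; simp [h]

theorem pvRep_ge {k : Nat} (h : ¬ k < 10) : pvRep k = pvRep (k / 10) ++ [Nat.digitChar (k % 10)] := by
  rw [pvRep]; simp [h]

theorem toDigitsCore_eq_rep : ∀ (n fuel : Nat) (ds : List Char), n < fuel →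
    Nat.toDigitsCore 10 fuel n ds = pvRep n ++ ds := by
  intro n
  induction n using Nat.strong_induction_on with
  | _ n IH =>
    intro fuel ds h
    match fuel with
    | fuel + 1 =>
      rw [Nat.toDigitsCore]
      by_cases h10 : n < 10
      · have : n / 10 = 0 := Nat.div_eq_of_lt h10
        simp [this, pvRep_lt h10, Nat.mod_eq_of_lt h10]
      · have hd : n / 10 < n := Nat.div_lt_self (by omega) (by omega)
        simp only [if_neg (by omega : ¬ n / 10 = 0)]
        rw [IH (n / 10) hd fuel _ (by omega), pvRep_ge h10]
        simp

theorem toDigits_eq_rep (n : Nat) : Nat.toDigits 10 n = pvRep n := by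
  simpa using toDigitsCore_eq_rep n (n + 1) [] (by omega)

theorem pvRep_head : ∀ k : Nat, ∃ m t, m < 10 ∧ pvRep k = Nat.digitChar m :: t := by
  intro k
  induction k using Nat.strong_induction_on with
  | _ k IH =>
    by_cases h : k < 10
    · exact ⟨k, [], h, pvRep_lt h⟩
    · obtain ⟨m, t, hm, ht⟩ := IH (k / 10) (Nat.div_lt_self (by omega) (by omega))
      exact ⟨m, t ++ [Nat.digitChar (k % 10)], hm, by rw [pvRep_ge h, ht]; simp⟩

theorem count_go_singleton (c : Char) : ∀ (cs : List Char) (fuel acc : Nat), cs.length ≤ fuel →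
    PySem.Chars.count.go [c] fuel cs acc = acc + cs.count c := by
  intro cs
  induction cs with
  | nil =>
    intro fuel acc _
    cases fuel <;> rw [PySem.Chars.count.go] <;> simp
  | cons h t IH =>
    intro fuel acc hf
    match fuel with
    | fuel + 1 =>
      rw [PySem.Chars.count.go]
      by_cases hc : c == h
      · simp only [List.isPrefixOf, hc, Bool.true_and, List.isPrefixOf_nil_left, if_true]
        rw [List.length_singleton, List.drop_one, List.tail_cons,
          IH fuel (acc + 1) (by simpa using hf)]
        have : h = c := (beq_iff_eq.mp hc).symm
        simp [this, List.count_cons]; omega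
      · simp only [List.isPrefixOf, hc, Bool.false_and, if_false]
        rw [IH fuel acc (by simpa using hf)]
        have : ¬ h = c := fun e => by simp [e] at hc
        simp [List.count_cons, this]

theorem count_singleton (cs : List Char) (c : Char) :
    PySem.Chars.count cs [c] = cs.count c := by
  rw [PySem.Chars.count]
  simp only [List.isEmpty_cons, if_false]
  simpa using count_go_singleton c cs cs.length 0 le_rfl

theorem foldA (cs : List Char) : ∀ (istr out : List Char),
    cs.foldl (fun (st : List Char × List Char) c =>
        if c = '?' then (st.1 ++ st.2.take 1, st.2.drop 1) else (st.1 ++ [c], st.2)) (out, istr)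
      = (out ++ pvSubst cs istr, istr.drop (cs.count '?')) := by
  induction cs with
  | nil => intro istr out; simp [pvSubst]
  | cons c cs IH =>
    intro istr out
    by_cases hc : c = '?'
    · subst hc
      simp only [List.foldl_cons, if_pos rfl]
      rw [IH]
      simp [pvSubst, List.count_cons, List.drop_drop, Nat.add_comm]
    · simp only [List.foldl_cons, if_neg hc]
      rw [IH]
      simp [pvSubst, hc, List.count_cons]

theorem pvSubst_no_q : ∀ (cs : List Char), cs.count '?' = 0 → ∀ istr, pvSubst cs istr = cs := by
  intro cs
  induction cs with
  | nil => intro _ _; rfl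
  | cons c cs IH =>
    intro h istr
    have hc : ¬ c = '?' := by intro e; simp [e, List.count_cons] at h
    have : cs.count '?' = 0 := by simp [List.count_cons, hc] at h; simpa using h
    simp [pvSubst, hc, IH this]

theorem digitChar_ne_pm : ∀ m : Nat, m < 10 → ¬(Nat.digitChar m = '+' ∨ Nat.digitChar m = '-') := by
  decide

theorem zfill_digit (m : Nat) (hm : m < 10) (t : List Char) (d : Nat) :
    PySem.Chars.zfill (Nat.digitChar m :: t) (d : Int) =
      List.replicate (d - (Nat.digitChar m :: t).length) '0' ++ (Nat.digitChar m :: t) := by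
  rw [PySem.Chars.zfill]
  by_cases h : (d : Int) ≤ ((Nat.digitChar m :: t).length : Int)
  · rw [if_pos h, Nat.sub_eq_zero_of_le (by exact_mod_cast h)]
    simp
  · rw [if_neg h]
    simp [digitChar_ne_pm m hm, Int.toNat_natCast]

theorem pvPadBU_zero : ∀ d : Nat, pvPadBU d 0 = List.replicate d '0' := by
  intro d
  induction d with
  | zero => rfl
  | succ d IH =>
    show pvPadBU d 0 ++ [Nat.digitChar 0] = _
    rw [IH]
    have : Nat.digitChar 0 = '0' := by decide
    rw [this]
    exact List.replicate_succ'.symm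

theorem rep_padBU : ∀ d : Nat, 1 ≤ d → ∀ k : Nat, k < 10 ^ d →
    List.replicate (d - (pvRep k).length) '0' ++ pvRep k = pvPadBU d k := by
  intro d hd
  induction d, hd using Nat.le_induction with
  | base =>
    intro k hk
    rw [pvRep_lt (by omega)]
    show _ = pvPadBU 0 (k / 10) ++ [Nat.digitChar (k % 10)]
    simp [Nat.mod_eq_of_lt (by omega : k < 10), pvPadBU]
  | succ d hd IH =>
    intro k hk
    show _ = pvPadBU d (k / 10) ++ [Nat.digitChar (k % 10)]
    by_cases h10 : k < 10
    · rw [pvRep_lt h10, Nat.div_eq_of_lt h10, pvPadBU_zero, Nat.mod_eq_of_lt h10]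
      simp
    · rw [pvRep_ge h10]
      have hlen : (pvRep (k / 10) ++ [Nat.digitChar (k % 10)]).length = (pvRep (k / 10)).length + 1 := by
        simp
      have hk' : k / 10 < 10 ^ d := by
        rw [Nat.div_lt_iff_lt_mul (by omega : (0 : Nat) < 10)]
        calc k < 10 ^ (d + 1) := hk
          _ = 10 ^ d * 10 := pow_succ 10 d
      rw [hlen, ← IH (k / 10) hk', Nat.succ_sub_succ]
      simp [List.append_assoc]

theorem pvPad_succ_right : ∀ (d k : Nat), k < 10 ^ (d + 1) →
    pvPad (d + 1) k = pvPad d (k / 10) ++ [Nat.digitChar (k % 10)] := by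
  intro d
  induction d with
  | zero =>
    intro k hk
    show [Nat.digitChar (k / 10 ^ 0)] = [] ++ [Nat.digitChar (k % 10)]
    simp [Nat.mod_eq_of_lt (by simpa using hk)]
  | succ d IH =>
    intro k hk
    show Nat.digitChar (k / 10 ^ (d + 1)) :: pvPad (d + 1) (k % 10 ^ (d + 1)) = _
    rw [IH (k % 10 ^ (d + 1)) (Nat.mod_lt _ (by positivity))]
    have h1 : k % 10 ^ (d + 1) / 10 = k / 10 % 10 ^ d := by
      have : (10 : Nat) ^ (d + 1) = 10 * 10 ^ d := by ring
      rw [this, Nat.mod_mul_right_div_self]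
    have h2 : k % 10 ^ (d + 1) % 10 = k % 10 :=
      Nat.mod_mod_of_dvd k ⟨10 ^ d, by ring⟩
    have h3 : k / 10 / 10 ^ d = k / 10 ^ (d + 1) := by
      rw [Nat.div_div_eq_div_mul, ← pow_succ']
    rw [h1, h2]
    show _ = (Nat.digitChar (k / 10 / 10 ^ d) :: pvPad d (k / 10 % 10 ^ d)) ++ [Nat.digitChar (k % 10)]
    rw [h3]
    simp

theorem padBU_eq_pad : ∀ (d k : Nat), k < 10 ^ d → pvPadBU d k = pvPad d k := by
  intro d
  induction d with
  | zero => intro k _; rfl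
  | succ d IH =>
    intro k hk
    show pvPadBU d (k / 10) ++ [Nat.digitChar (k % 10)] = _
    rw [pvPad_succ_right d k hk, IH (k / 10) (by
      rw [Nat.div_lt_iff_lt_mul (show 0 < 10 by omega)]
      calc k < 10 ^ (d + 1) := hk
        _ = 10 ^ d * 10 := by rw [pow_succ])]

theorem range_mul : ∀ (a m : Nat),
    List.range (a * m) = (List.range a).flatMap (fun j => (List.range m).map (fun r => j * m + r)) := by
  intro a m
  induction a with
  | zero => simp
  | succ a IH =>
    rw [Nat.succ_mul, List.range_add, IH, List.range_succ, List.flatMap_append]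
    simp [Nat.add_comm]

theorem digits_lit : "0123456789".toList = (List.range 10).map Nat.digitChar := by decide

-- the common specification: all substitutions in lexicographic order
def pvSpec (cs : List Char) : List (List Char) :=
  (List.range (10 ^ cs.count '?')).map (fun k => pvSubst cs (pvPad (cs.count '?') k))

theorem pvSpec_nil : pvSpec [] = [[]] := by
  simp [pvSpec, pvSubst, List.range_succ]

theorem pvSubst_append_free : ∀ (p : List Char), p.count '?' = 0 →
    ∀ (cs istr : List Char), pvSubst (p ++ cs) istr = p ++ pvSubst cs istr := by
  intro p
  induction p with
  | nil => intro _ cs istr; rfl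
  | cons a p IH =>
    intro h cs istr
    have ha : ¬ a = '?' := by intro e; simp [e, List.count_cons] at h
    have hp : p.count '?' = 0 := by simp [List.count_cons, ha] at h; simpa using h
    simp [pvSubst, ha, IH hp]

theorem pvSpec_append_free (p : List Char) (hp : p.count '?' = 0) (cs : List Char) :
    pvSpec (p ++ cs) = (pvSpec cs).map (fun t => p ++ t) := by
  unfold pvSpec
  rw [List.count_append, hp, Nat.zero_add, List.map_map]
  apply List.map_congr_left
  intro k _
  simp [pvSubst_append_free p hp]

theorem pvSpec_q (cs : List Char) :
    pvSpec ('?' :: cs) = (List.range 10).flatMap (fun j => (pvSpec cs).map (fun t => Nat.digitChar j :: t)) := by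
  unfold pvSpec
  have hcount : (('?' : Char) :: cs).count '?' = cs.count '?' + 1 := by
    simp [List.count_cons]
  rw [hcount, pow_succ', range_mul 10 (10 ^ cs.count '?'), List.map_flatMap]
  apply List.flatMap_congr
  intro j _
  rw [List.map_map, List.map_map]
  apply List.map_congr_left
  intro r hr
  rw [List.mem_range] at hr
  have hpos : 0 < 10 ^ cs.count '?' := by positivity
  simp only [Function.comp_apply]
  have hdiv : (j * 10 ^ cs.count '?' + r) / 10 ^ cs.count '?' = j := by
    rw [Nat.mul_comm, Nat.mul_add_div hpos, Nat.div_eq_of_lt hr, Nat.add_zero]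
  have hmod : (j * 10 ^ cs.count '?' + r) % 10 ^ cs.count '?' = r := by
    rw [Nat.add_comm, Nat.add_mul_mod_self_right, Nat.mod_eq_of_lt hr]
  have hpad : pvPad (cs.count '?' + 1) (j * 10 ^ cs.count '?' + r)
      = Nat.digitChar j :: pvPad (cs.count '?') r := by
    show Nat.digitChar _ :: pvPad _ _ = _
    rw [hdiv, hmod]
  rw [hpad]
  simp [pvSubst]

-- reference single-char split, structural
def pvSplit : List Char → List (List Char)
  | [] => [[]]
  | c :: cs =>
    if c = '?' then [] :: pvSplit cs
    else (c :: (pvSplit cs).headI) :: (pvSplit cs).tail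

theorem pvSplit_ne_nil : ∀ cs : List Char, pvSplit cs ≠ [] := by
  intro cs
  cases cs with
  | nil => simp [pvSplit]
  | cons c cs => by_cases h : c = '?' <;> simp [pvSplit, h]

theorem splitOn_go_eq : ∀ (l : List Char) (fuel : Nat) (cur : List Char) (acc : List (List Char)),
    l.length < fuel →
    PySem.Chars.splitOn.go ['?'] fuel l cur acc
      = acc.reverse ++ (cur.reverse ++ ((pvSplit l).headI)) :: (pvSplit l).tail := by
  intro l
  induction l with
  | nil =>
    intro fuel cur acc h
    match fuel with
    | fuel + 1 =>
      rw [PySem.Chars.splitOn.go] <;> simp [pvSplit]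
  | cons a rest IH =>
    intro fuel cur acc h
    match fuel with
    | fuel + 1 =>
      rw [PySem.Chars.splitOn.go]
      by_cases ha : a = '?'
      · subst ha
        rw [if_pos (by simp [List.isPrefixOf])]
        rw [List.length_singleton, List.drop_one, List.tail_cons,
          IH fuel [] (cur.reverse :: acc) (by simpa using h)]
        obtain ⟨p, t, hpt⟩ : ∃ p t, pvSplit rest = p :: t := by
          cases hh : pvSplit rest with
          | nil => exact absurd hh (pvSplit_ne_nil rest)
          | cons p t => exact ⟨p, t, rfl⟩
        simp [hpt, pvSplit]
      · rw [if_neg (by simp [List.isPrefixOf]; exact fun e => ha e.symm)]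
        rw [IH fuel (a :: cur) acc (by simpa using h)]
        simp [pvSplit, ha]

theorem splitOn_eq (cs : List Char) : PySem.Chars.splitOn cs ['?'] = pvSplit cs := by
  rw [PySem.Chars.splitOn, splitOn_go_eq cs (cs.length + 1) [] [] (by omega)]
  obtain ⟨p, t, hpt⟩ : ∃ p t, pvSplit cs = p :: t := by
    cases h : pvSplit cs with
    | nil => exact absurd h (pvSplit_ne_nil cs)
    | cons p t => exact ⟨p, t, rfl⟩
  simp [hpt]

theorem headI_mem_of_ne_nil {α : Type} [Inhabited α] {l : List α} (h : l ≠ []) : l.headI ∈ l := by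
  cases l with
  | nil => exact absurd rfl h
  | cons a t => simp

theorem pvSplit_free : ∀ (cs : List Char), ∀ p ∈ pvSplit cs, p.count '?' = 0 := by
  intro cs
  induction cs with
  | nil =>
    intro p hp
    simp [pvSplit] at hp
    simp [hp]
  | cons c cs IH =>
    intro p hp
    by_cases hc : c = '?'
    · simp only [pvSplit, if_pos hc, List.mem_cons] at hp
      rcases hp with h | h
      · simp [h]
      · exact IH p h
    · simp only [pvSplit, if_neg hc, List.mem_cons] at hp
      rcases hp with h | h
      · subst h
        have hq : ('?' : Char) ≠ c := fun e => hc e.symm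
        have hm := IH _ (headI_mem_of_ne_nil (pvSplit_ne_nil cs))
        simp [List.count_cons, hq, hm, hc]
      · exact IH p (List.mem_of_mem_tail h)

theorem pvSplit_join : ∀ cs : List Char,
    cs = (pvSplit cs).headI ++ ((pvSplit cs).tail).flatMap (fun p => '?' :: p) := by
  intro cs
  induction cs with
  | nil => rfl
  | cons c cs IH =>
    by_cases hc : c = '?'
    · subst hc
      simp only [pvSplit, if_pos rfl, List.headI_cons, List.tail_cons, List.nil_append]
      obtain ⟨p, t, hpt⟩ : ∃ p t, pvSplit cs = p :: t := by
        cases h : pvSplit cs with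
        | nil => exact absurd h (pvSplit_ne_nil cs)
        | cons p t => exact ⟨p, t, rfl⟩
      rw [hpt]
      rw [hpt] at IH
      simp only [List.headI_cons, List.tail_cons] at IH
      simp [List.flatMap_cons]
      exact IH
    · simp only [pvSplit, if_neg hc, List.headI_cons, List.tail_cons, List.cons_append]
      exact congrArg (c :: ·) IH

theorem foldB : ∀ (rest : List (List Char)), (∀ p ∈ rest, p.count '?' = 0) →
    ∀ outs : List (List Char),
    rest.foldl (fun outs part =>
        outs.flatMap (fun o => ("0123456789".toList).map (fun d => o ++ d :: part))) outs
      = outs.flatMap (fun o => (pvSpec (rest.flatMap (fun p => '?' :: p))).map (fun t => o ++ t)) := by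
  intro rest
  induction rest with
  | nil =>
    intro _ outs
    simp [pvSpec_nil]
  | cons part rest IH =>
    intro hfree outs
    have hpart : part.count '?' = 0 := hfree part (by simp)
    have hrest : ∀ p ∈ rest, p.count '?' = 0 := fun p hp => hfree p (by simp [hp])
    rw [List.foldl_cons, IH hrest]
    rw [List.flatMap_cons, List.cons_append, pvSpec_q, pvSpec_append_free part hpart]
    simp only [digits_lit, List.flatMap_map, List.map_flatMap, List.map_map,
      List.flatMap_assoc, Function.comp_def]
    apply List.flatMap_congr
    intro o _
    simp [List.flatMap_map, List.map_map, List.append_assoc]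

theorem A_eq (s : String) :
    give_options s = (List.range (10 ^ s.toList.count '?')).map
      (fun k => String.mk (pvSubst s.toList (pvPad (s.toList.count '?') k))) := by
  unfold give_options
  have hdig : PySem.Str.count s "?" = s.toList.count '?' := by
    rw [PySem.Str.count]
    exact count_singleton s.toList '?'
  rw [hdig]
  have hb : ((10 : Int) ^ s.toList.count '?' - 0).toNat = 10 ^ s.toList.count '?' := by
    rw [Int.sub_zero, show ((10 : Int) ^ s.toList.count '?') = ((10 ^ s.toList.count '?' : Nat) : Int) by push_cast; ring]
    exact Int.toNat_natCast _
  rw [PySem.List.pyRange_one, hb, List.map_map]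
  apply List.map_congr_left
  intro k hk
  rw [List.mem_range] at hk
  simp only [Function.comp_apply]
  have hchars : PySem.Int.toChars (0 + (k : Int)) = pvRep k := by
    rw [PySem.Int.toChars]
    rw [if_neg (by omega)]
    rw [show ((0 : Int) + (k : Int)).toNat = k by omega]
    exact toDigits_eq_rep k
  rw [hchars, foldA]
  by_cases hd : s.toList.count '?' = 0
  · rw [hd]
    simp only [pvSubst_no_q s.toList hd]
    simp
  · obtain ⟨m, t, hm, ht⟩ := pvRep_head k
    rw [ht, zfill_digit m hm t, ← ht, rep_padBU _ (by omega) k hk,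
      padBU_eq_pad _ k hk]
    simp

-- ===== VERDICT (by name: the statement is the Claim_ definition above) =====
theorem give_options_spec : Claim_equal_give_options := by
  intro s _
  unfold Spec_give_options give_options_alt
  rw [A_eq, splitOn_eq]
  obtain ⟨p, t, hpt⟩ : ∃ p t, pvSplit s.toList = p :: t := by
    cases h : pvSplit s.toList with
    | nil => exact absurd h (pvSplit_ne_nil s.toList)
    | cons p t => exact ⟨p, t, rfl⟩
  rw [hpt]
  simp only [List.drop_one, List.tail_cons, List.headI_cons]
  rw [foldB t (fun q hq => pvSplit_free s.toList q (by rw [hpt]; exact List.mem_cons_of_mem _ hq)) [p]]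
  have hp0 : p.count '?' = 0 := pvSplit_free s.toList p (by rw [hpt]; simp)
  have hjoin : s.toList = p ++ t.flatMap (fun q => '?' :: q) := by
    have := pvSplit_join s.toList
    rw [hpt] at this
    simpa using this
  conv_lhs => rw [show (fun k => String.mk (pvSubst s.toList (pvPad (s.toList.count '?') k)))
      = String.mk ∘ (fun k => pvSubst s.toList (pvPad (s.toList.count '?') k)) from rfl]
  rw [← List.map_map]
  show (pvSpec s.toList).map String.mk = _
  conv_lhs => rw [hjoin]
  rw [pvSpec_append_free p hp0]
  simp [List.map_map, Function.comp_def]
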